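-- pv_equiv track=rewrite | github.com/alexandraback/datacollection | solutions_5631989306621952_1/Python/naagi/a-large.py | go
-- ===== SOURCE A (Python) =====
-- def go (s):
--   n = len(s)
--   if n < 2:
--     return s
--   imx = n - 1
--   for i in range (n-2, -1, -1):
--     if s[imx] < s[i]:
--       imx = i
--   return s[imx] + go(s[:imx]) + s[imx+1:]
-- ===== SOURCE B (Python) =====
-- def go(s):
--     # One left-to-right pass: collect the weak prefix-maxima positions (ties kept),
--     # then emit those record characters in reverse followed by the untouched gap segments.
--     recs = []
--     for i in range(len(s)):
--         if not recs or s[recs[-1]] <= s[i]: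
--             recs.append(i)
--     parts = [s[i] for i in reversed(recs)]
--     bounds = recs[1:] + [len(s)]
--     for r, nxt in zip(recs, bounds):
--         parts.append(s[r + 1:nxt])
--     return ''.join(parts)
-- ===== Notes on version B (the rewrite author's own statement) =====
-- stated objective: faster
-- what changed: Replaces the recursive rescan (find rightmost max, recurse on the prefix) by a single left-to-right pass collecting weak prefix-maxima positions, then assembling the output from those records reversed plus the gap segments.
import Mathlib
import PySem

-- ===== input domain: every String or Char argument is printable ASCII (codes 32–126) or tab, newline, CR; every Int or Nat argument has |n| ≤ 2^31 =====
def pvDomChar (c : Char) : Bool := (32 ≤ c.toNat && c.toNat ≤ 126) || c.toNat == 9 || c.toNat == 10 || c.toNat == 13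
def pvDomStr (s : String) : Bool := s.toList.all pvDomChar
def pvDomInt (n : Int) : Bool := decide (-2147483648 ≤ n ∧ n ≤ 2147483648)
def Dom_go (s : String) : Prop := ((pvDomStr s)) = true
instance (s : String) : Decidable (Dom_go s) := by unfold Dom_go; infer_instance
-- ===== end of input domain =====

-- B replaces A's recursive rescan by one linear pass over the string (objective: faster).

-- ===== PORT A =====
-- A's inner loop 'for i in range(n-2,-1,-1): if s[imx] < s[i]: imx = i'
-- (indices are always in range, so list getD is exact here)
def goStep (l : List Char) (imx i : Nat) : Nat :=
  if l.getD imx ' ' < l.getD i ' ' then i else imx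

def findImx (l : List Char) : Nat :=
  ((List.range (l.length - 1)).reverse).foldl (goStep l) (l.length - 1)

theorem goStep_foldl_lt (l : List Char) (xs : List Nat) (acc : Nat)
    (hacc : acc < l.length) (hxs : ∀ x ∈ xs, x < l.length) :
    xs.foldl (goStep l) acc < l.length := by
  induction xs generalizing acc with
  | nil => exact hacc
  | cons x t ih =>
      simp only [List.foldl_cons]
      have hx := hxs x (by simp)
      exact ih _ (by unfold goStep; split <;> omega) (fun y hy => hxs y (by simp [hy]))

theorem findImx_lt (l : List Char) (h : 1 ≤ l.length) : findImx l < l.length :=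
  goStep_foldl_lt l _ _ (by omega) (by intro x hx; simp at hx; omega)

def goList (l : List Char) : List Char :=
  if l.length < 2 then l
  else
    let imx := findImx l
    l.getD imx ' ' :: (goList (l.take imx) ++ l.drop (imx + 1))
termination_by l.length
decreasing_by
  have := findImx_lt l (by omega)
  simp only [List.length_take]
  omega

def go (s : String) : String := String.mk (goList s.toList)

-- ===== PORT B =====
-- B's loop body: 'if not recs or s[recs[-1]] <= s[i]: recs.append(i)'
def recStep (l : List Char) (recs : List Nat) (i : Nat) : List Nat :=
  match recs.getLast? with
  | none => recs ++ [i]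
  | some j => if l.getD j ' ' ≤ l.getD i ' ' then recs ++ [i] else recs

def findRecs (l : List Char) : List Nat :=
  (List.range l.length).foldl (recStep l) []

def goListB (l : List Char) : List Char :=
  let recs := findRecs l
  (recs.reverse.map (fun i => l.getD i ' ')) ++
    (recs.zip (recs.drop 1 ++ [l.length])).flatMap (fun p => (l.take p.2).drop (p.1 + 1))

def go_alt (s : String) : String := String.mk (goListB s.toList)

-- ===== PRECONDITION & SPEC =====
def Spec_go (s : String) (out : String) : Prop := out = go_alt s
instance (s : String) (out : String) : Decidable (Spec_go s out) := by unfold Spec_go; infer_instance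

-- ===== CLAIM (what is proved, stated in full; the proofs are below) =====
def Claim_equal_go : Prop := ∀ (s : String), Dom_go s → Spec_go s (go s)


-- ===== LEMMAS AND PROOFS =====

-- B's record list after scanning the first m indices
def recsUpTo (l : List Char) : Nat → List Nat
  | 0 => []
  | m + 1 => recStep l (recsUpTo l m) m

theorem findRecs_eq (l : List Char) : findRecs l = recsUpTo l l.length := by
  suffices h : ∀ n, (List.range n).foldl (recStep l) [] = recsUpTo l n from h _
  intro n
  induction n with
  | zero => rfl
  | succ n ih => rw [List.range_succ, List.foldl_append, ih]; rfl

-- invariant of B's scan: elements are in range, the list is empty only at step 0,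
-- and its last element is the rightmost maximum of the scanned prefix
theorem recsUpTo_inv (l : List Char) (m : Nat) :
    (∀ j ∈ recsUpTo l m, j < m) ∧
    (recsUpTo l m = [] → m = 0) ∧
    (∀ j, (recsUpTo l m).getLast? = some j →
      (∀ i, i < m → l.getD i ' ' ≤ l.getD j ' ') ∧
      (∀ i, j < i → i < m → l.getD i ' ' < l.getD j ' ')) := by
  induction m with
  | zero => simp [recsUpTo]
  | succ m ih =>
    obtain ⟨hlt, hne, hlast⟩ := ih
    cases hL : (recsUpTo l m).getLast? with
    | none =>
        have hnil : recsUpTo l m = [] := List.getLast?_eq_none_iff.mp hL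
        have hm0 := hne hnil
        simp only [recsUpTo, recStep, hnil, List.nil_append]
        refine ⟨?_, by simp, ?_⟩
        · intro j hj; simp at hj; omega
        · intro j hj
          have hj0 : j = m := by simp at hj; omega
          refine ⟨fun i hi => ?_, fun i h1 h2 => by omega⟩
          have hi' : i = j := by omega
          subst hi'; exact le_refl _
    | some j0 =>
        simp only [recsUpTo, recStep, hL]
        have hj0m : j0 < m := hlt j0 (List.mem_of_getLast? hL)
        by_cases hc : l.getD j0 ' ' ≤ l.getD m ' '
        · rw [if_pos hc]
          refine ⟨?_, by simp, ?_⟩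
          · intro j hj
            rcases List.mem_append.mp hj with h | h
            · exact Nat.lt_succ_of_lt (hlt j h)
            · simp at h; omega
          · intro j hj
            rw [List.getLast?_concat] at hj
            injection hj with hj
            subst hj
            obtain ⟨hle, _⟩ := hlast j0 hL
            refine ⟨fun i hi => ?_, fun i h1 h2 => by omega⟩
            rcases Nat.lt_or_ge i m with h | h
            · exact le_trans (hle i h) hc
            · have : i = m := by omega
              subst this; exact le_refl _
        · rw [if_neg hc]
          refine ⟨fun j hj => Nat.lt_succ_of_lt (hlt j hj), ?_, ?_⟩
          · intro h; rw [h] at hL; simp at hL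
          · intro j hj
            rw [hL] at hj
            injection hj with hj
            subst hj
            obtain ⟨hle, hstr⟩ := hlast j0 hL
            have hmlt : l.getD m ' ' < l.getD j0 ' ' := lt_of_not_ge hc
            refine ⟨fun i hi => ?_, fun i h1 h2 => ?_⟩
            · rcases Nat.lt_or_ge i m with h | h
              · exact hle i h
              · have : i = m := by omega
                subst this; exact le_of_lt hmlt
            · rcases Nat.lt_or_ge i m with h | h
              · exact hstr i h1 h
              · have : i = m := by omega
                subst this; exact hmlt

-- invariant of A's right-to-left scan: the fold result is the rightmost maximum
theorem foldA_inv (l : List Char) (m : Nat) :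
    ∀ acc : Nat, m ≤ acc → acc < l.length →
    (∀ i, m ≤ i → i < l.length → l.getD i ' ' ≤ l.getD acc ' ') →
    (∀ i, acc < i → i < l.length → l.getD i ' ' < l.getD acc ' ') →
    (∀ i, i < l.length →
        l.getD i ' ' ≤ l.getD (((List.range m).reverse).foldl (goStep l) acc) ' ') ∧
    (∀ i, ((List.range m).reverse).foldl (goStep l) acc < i → i < l.length →
        l.getD i ' ' < l.getD (((List.range m).reverse).foldl (goStep l) acc) ' ') := by
  induction m with
  | zero =>
      intro acc _ _ h3 h4
      exact ⟨fun i hi => h3 i (Nat.zero_le i) hi, h4⟩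
  | succ m ih =>
      intro acc hm h1 h3 h4
      rw [List.range_succ, List.reverse_append]
      simp only [List.reverse_singleton, List.singleton_append, List.foldl_cons]
      unfold goStep
      by_cases hc : l.getD acc ' ' < l.getD m ' '
      · rw [if_pos hc]
        refine ih m le_rfl (by omega) (fun i hi1 hi2 => ?_) (fun i hi1 hi2 => ?_)
        · rcases Nat.lt_or_ge i (m + 1) with h | h
          · have : i = m := by omega
            subst this; exact le_refl _
          · exact le_of_lt (lt_of_le_of_lt (h3 i h hi2) hc)
        · rcases Nat.lt_or_ge i acc with h | h
          · exact lt_of_le_of_lt (h3 i (by omega) hi2) hc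
          · rcases Nat.lt_or_ge acc i with h' | h'
            · exact lt_trans (h4 i h' hi2) hc
            · have : i = acc := by omega
              subst this; exact hc
      · rw [if_neg hc]
        refine ih acc (by omega) h1 (fun i hi1 hi2 => ?_) h4
        rcases Nat.lt_or_ge i (m + 1) with h | h
        · have : i = m := by omega
          subst this; exact le_of_not_gt hc
        · exact h3 i h hi2
theorem findImx_spec (l : List Char) (h : 1 ≤ l.length) :
    (∀ i, i < l.length → l.getD i ' ' ≤ l.getD (findImx l) ' ') ∧
    (∀ i, findImx l < i → i < l.length → l.getD i ' ' < l.getD (findImx l) ' ') := by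
  unfold findImx
  refine foldA_inv l (l.length - 1) (l.length - 1) le_rfl (by omega)
    (fun i hi1 hi2 => ?_) (fun i hi1 hi2 => by omega)
  have : i = l.length - 1 := by omega
  subst this; exact le_refl _

-- after the index findImx l is appended, B's scan never appends again
theorem recsUpTo_stable (l : List Char) (h : 1 ≤ l.length) :
    ∀ k, findImx l + 1 ≤ k → k ≤ l.length →
    recsUpTo l k = recsUpTo l (findImx l) ++ [findImx l] := by
  have himx := findImx_spec l h
  have himxlt : findImx l < l.length := findImx_lt l h
  intro k
  induction k with
  | zero => omega
  | succ k ih =>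
      intro hk1 hk2
      rcases Nat.lt_or_ge k (findImx l + 1) with hlt | hge
      · have hkeq : k = findImx l := by omega
        subst hkeq
        cases hL : (recsUpTo l (findImx l)).getLast? with
        | none =>
            simp only [recsUpTo, recStep, List.getLast?_eq_none_iff.mp hL,
              List.getLast?_nil, List.nil_append]
        | some j0 =>
            have hj0 : j0 < findImx l :=
              (recsUpTo_inv l (findImx l)).1 j0 (List.mem_of_getLast? hL)
            have hcond : l.getD j0 ' ' ≤ l.getD (findImx l) ' ' := himx.1 j0 (by omega)
            simp only [recsUpTo, recStep, hL, if_pos hcond]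
      · have ihk := ih hge (by omega)
        have hcond : ¬ l.getD (findImx l) ' ' ≤ l.getD k ' ' :=
          not_le_of_gt (himx.2 k (by omega) (by omega))
        simp only [recsUpTo, recStep, ihk, List.getLast?_concat, if_neg hcond]

theorem getD_take_eq (l : List Char) (k i : Nat) (h : i < k) :
    (l.take k).getD i ' ' = l.getD i ' ' := by
  simp [List.getD, h]

-- B's scan of a prefix agrees with B's scan of the whole string
theorem recsUpTo_take (l : List Char) (k : Nat) :
    ∀ m, m ≤ k → recsUpTo (l.take k) m = recsUpTo l m := by
  intro m
  induction m with
  | zero => intro _; rfl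
  | succ m ih =>
      intro h
      have ihm := ih (by omega)
      cases hL : (recsUpTo l m).getLast? with
      | none => simp only [recsUpTo, recStep, ihm, hL]
      | some j =>
          have hjm : j < m := (recsUpTo_inv l m).1 j (List.mem_of_getLast? hL)
          simp only [recsUpTo, recStep, ihm, hL,
            getD_take_eq l k j (by omega), getD_take_eq l k m (by omega)]

theorem main_eq (l : List Char) : goList l = goListB l := by
  suffices H : ∀ n (l : List Char), l.length = n → goList l = goListB l from H l.length l rfl
  intro n
  induction n using Nat.strong_induction_on with
  | _ n ih =>
    intro l hl
    rw [goList]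
    by_cases h2 : l.length < 2
    · rw [if_pos h2]
      match l with
      | [] => rfl
      | [c] =>
          show [c] = goListB [c]
          simp [goListB, findRecs, List.range_succ, recStep]
      | a :: b :: t => simp at h2
    · rw [if_neg h2]
      have hn2 : 2 ≤ l.length := by omega
      have himxlt : findImx l < l.length := findImx_lt l (by omega)
      have hplen : (l.take (findImx l)).length = findImx l := by
        simp [List.length_take]; omega
      have IH : goList (l.take (findImx l)) = goListB (l.take (findImx l)) :=
        ih (l.take (findImx l)).length (by omega) _ rfl
      -- the record list of l is the record list of the prefix plus the final index
      have hrecs : findRecs l = findRecs (l.take (findImx l)) ++ [findImx l] := by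
        rw [findRecs_eq, findRecs_eq, hplen, recsUpTo_take l (findImx l) (findImx l) le_rfl]
        exact recsUpTo_stable l (by omega) l.length (by omega) le_rfl
      have hbound : ∀ j ∈ findRecs (l.take (findImx l)), j < findImx l := by
        rw [findRecs_eq, hplen, recsUpTo_take l (findImx l) (findImx l) le_rfl]
        exact (recsUpTo_inv l (findImx l)).1
      show l.getD (findImx l) ' ' :: (goList (l.take (findImx l)) ++ l.drop (findImx l + 1))
          = goListB l
      rw [IH]
      simp only [goListB]
      rw [hrecs, hplen]
      obtain hr | ⟨x, xs, hr⟩ : findRecs (l.take (findImx l)) = [] ∨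
          ∃ x xs, findRecs (l.take (findImx l)) = x :: xs := by
        cases findRecs (l.take (findImx l)) with
        | nil => exact Or.inl rfl
        | cons a t => exact Or.inr ⟨a, t, rfl⟩
      · rw [hr]
        simp [List.take_length]
      · rw [hr]
        have hmem : ∀ j ∈ x :: xs, j < findImx l := by rw [← hr]; exact hbound
        have hmap : (x :: xs).reverse.map (fun i => (l.take (findImx l)).getD i ' ')
            = (x :: xs).reverse.map (fun i => l.getD i ' ') :=
          List.map_congr_left (fun i hi => getD_take_eq l _ i (hmem i (List.mem_reverse.mp hi)))
        have hseg : ((x :: xs).zip (xs ++ [findImx l])).flatMap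
              (fun p => ((l.take (findImx l)).take p.2).drop (p.1 + 1))
            = ((x :: xs).zip (xs ++ [findImx l])).flatMap
              (fun p => (l.take p.2).drop (p.1 + 1)) := by
          apply List.flatMap_congr
          intro p hp
          have hp2 : p.2 ≤ findImx l := by
            rcases List.mem_append.mp (List.of_mem_zip hp).2 with h | h
            · exact le_of_lt (hmem p.2 (List.mem_cons_of_mem x h))
            · simp at h; omega
          rw [List.take_take, min_eq_left hp2]
        have hzip : (x :: (xs ++ [findImx l])).zip ((xs ++ [findImx l]) ++ [l.length])
            = (x :: xs).zip (xs ++ [findImx l]) ++ [(findImx l, l.length)] := by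
          have := List.zip_append (l₁ := x :: xs) (l₂ := xs ++ [findImx l])
            (r₁ := [findImx l]) (r₂ := [l.length]) (by simp)
          simpa using this
        have hrev : (x :: (xs ++ [findImx l])).reverse = findImx l :: (x :: xs).reverse := by
          simp
        simp only [List.cons_append, List.drop_one, List.tail_cons]
        rw [hrev, hzip]
        simp only [List.map_cons, List.flatMap_append, List.flatMap_cons, List.flatMap_nil,
          List.append_nil, List.take_length]
        rw [hmap, hseg]
        simp [List.append_assoc]

-- ===== VERDICT (by name: the statement is the Claim_ definition above) =====
theorem go_spec : Claim_equal_go := by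
  intro s _
  unfold Spec_go go go_alt
  exact congrArg String.mk (main_eq s.toList)
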